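-- pv_equiv track=rewrite | github.com/flu-crew/OLA-Net | olanet.py | _determine_consensus_placement
-- ===== SOURCE A (Python) =====
-- from typing import List, Dict, Tuple, Set, Optional
--
-- def _determine_consensus_placement(leaf_id: int, placements: Dict[int, int], unresolved_indices: List[int],
--                                    ola_vectors: List[List[int]], m_sets: List[List[Set[int]]],
--                                    mismatch_neg: Set[int]) -> Optional[int]:
--     if len(set(placements.values())) > 1:
--         mismatch_neg.add(-leaf_id)
--         return None
--     if placements:
--         return list(placements.values())[0]
--
--     intersection = None
--     for tree_id in unresolved_indices:
--         multi_id = ola_vectors[tree_id][leaf_id - 1]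
--         current_set = m_sets[tree_id][abs(multi_id)]
--         if intersection is None:
--             intersection = current_set.copy()
--         else:
--             intersection.intersection_update(current_set)
--     if intersection:
--         intersection.difference_update(mismatch_neg)
--
--     if not intersection:
--         mismatch_neg.add(-leaf_id)
--         return None
--     else:
--         return max(intersection, key=abs)
-- ===== SOURCE B (Python) =====
-- # B: aggregates by a single Counter pass over every selected set (membership-count == number
-- # of selected trees) instead of A's iterated set-intersection.  Mutates mismatch_neg exactly
-- # as A does on the None branches.
-- from collections import Counter
--
-- def _determine_consensus_placement(leaf_id, placements, unresolved_indices,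
--                                    ola_vectors, m_sets, mismatch_neg):
--     if len(set(placements.values())) > 1:
--         mismatch_neg.add(-leaf_id)
--         return None
--     if placements:
--         return next(iter(placements.values()))
--     counts = Counter()
--     for tree_id in unresolved_indices:
--         counts.update(m_sets[tree_id][abs(ola_vectors[tree_id][leaf_id - 1])])
--     candidates = {e for e, c in counts.items() if c == len(unresolved_indices)} - mismatch_neg
--     if not candidates:
--         mismatch_neg.add(-leaf_id)
--         return None
--     return max(candidates, key=abs)
-- ===== Notes on version B (the rewrite author's own statement) =====
-- stated objective: alternative
-- what changed: Replaces the iterated set-intersection accumulator with one collections.Counter pass over all selected sets, keeping the elements whose membership count equals the number of selected trees.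
-- outside the precondition, e.g. on _determine_consensus_placement(1, {}, [0], [[0]], [[{4, 3, -4, -3}]], set()): A returns 4, B returns -4
import Mathlib
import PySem

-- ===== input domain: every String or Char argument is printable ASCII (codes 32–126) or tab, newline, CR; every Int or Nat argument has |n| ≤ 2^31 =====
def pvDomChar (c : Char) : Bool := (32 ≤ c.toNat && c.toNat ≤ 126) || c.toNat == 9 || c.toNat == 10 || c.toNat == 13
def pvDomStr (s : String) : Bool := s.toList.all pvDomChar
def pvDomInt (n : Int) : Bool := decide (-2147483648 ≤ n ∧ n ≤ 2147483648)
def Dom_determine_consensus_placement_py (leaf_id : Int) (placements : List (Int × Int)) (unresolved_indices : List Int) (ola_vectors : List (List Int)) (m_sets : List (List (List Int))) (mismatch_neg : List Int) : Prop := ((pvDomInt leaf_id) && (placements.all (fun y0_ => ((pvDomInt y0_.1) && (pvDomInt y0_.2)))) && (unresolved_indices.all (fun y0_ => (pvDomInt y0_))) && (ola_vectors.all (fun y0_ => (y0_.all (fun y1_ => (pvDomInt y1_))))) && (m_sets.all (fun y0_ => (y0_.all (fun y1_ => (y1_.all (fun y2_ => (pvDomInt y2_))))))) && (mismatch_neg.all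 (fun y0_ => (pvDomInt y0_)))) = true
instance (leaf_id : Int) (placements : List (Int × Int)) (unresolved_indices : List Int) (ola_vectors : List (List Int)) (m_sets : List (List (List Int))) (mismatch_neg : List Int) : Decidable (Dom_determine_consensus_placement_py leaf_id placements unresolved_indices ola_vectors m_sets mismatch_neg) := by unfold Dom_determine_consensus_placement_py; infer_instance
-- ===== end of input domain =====

-- B replaces A's iterated set-intersection with one Counter pass (membership count = number of
-- selected trees); same cost, different aggregation ('alternative').  Both Pythons mutate
-- mismatch_neg on the None branches identically; the equivalence proved here is about the
-- RETURN value only.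

-- ===== PORT A =====
-- shared subexpression of both Pythons: m_sets[tree_id][abs(ola_vectors[tree_id][leaf_id-1])]
-- (pyGetD's defaults are never used on inputs admitted by Pre_, which makes every lookup in-range)
def pvCurSet (leaf_id : Int) (ola_vectors : List (List Int)) (m_sets : List (List (List Int))) (tree_id : Int) : List Int :=
  let multi_id := PySem.List.pyGetD (PySem.List.pyGetD ola_vectors tree_id []) (leaf_id - 1) 0
  PySem.List.pyGetD (PySem.List.pyGetD m_sets tree_id []) |multi_id| []

def determine_consensus_placement_py (leaf_id : Int) (placements : List (Int × Int)) (unresolved_indices : List Int) (ola_vectors : List (List Int)) (m_sets : List (List (List Int))) (mismatch_neg : List Int) : Option Int :=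
  let d := PySem.Dict.ofList placements
  if PySem.Set.len (PySem.Set.ofList d.values) > 1 then none
  else if d.items ≠ [] then d.values.head?
  else
    let intersection : Option (List Int) :=
      unresolved_indices.foldl (fun acc tree_id =>
        let current_set := pvCurSet leaf_id ola_vectors m_sets tree_id
        match acc with
        | none => some current_set
        | some s => some (PySem.Set.inter s current_set)) none
    let intersection : Option (List Int) :=
      match intersection with
      | none => none
      | some s => if s ≠ [] then some (PySem.Set.diff s mismatch_neg) else some s
    match intersection with
    | none => none
    | some s => if s = [] then none else PySem.List.max? s (fun x => |x|)

-- ===== PORT B =====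
def determine_consensus_placement_py_alt (leaf_id : Int) (placements : List (Int × Int)) (unresolved_indices : List Int) (ola_vectors : List (List Int)) (m_sets : List (List (List Int))) (mismatch_neg : List Int) : Option Int :=
  let d := PySem.Dict.ofList placements
  if PySem.Set.len (PySem.Set.ofList d.values) > 1 then none
  else if d.items ≠ [] then d.values.head?
  else
    let counts : PySem.Dict Int Int :=
      unresolved_indices.foldl (fun c tree_id =>
        (pvCurSet leaf_id ola_vectors m_sets tree_id).foldl (fun c e => c.modify e 0 (· + 1)) c)
        PySem.Dict.empty
    let candidates : List Int :=
      PySem.Set.diff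
        (PySem.Set.ofList ((counts.items.filter (fun p => p.2 == (unresolved_indices.length : Int))).map (·.1)))
        mismatch_neg
    if candidates = [] then none else PySem.List.max? candidates (fun x => |x|)

-- ===== PRECONDITION & SPEC =====
-- Pre_ excludes (only when the loop is reached, i.e. placements = {}): (a) inputs where an index
-- lookup raises IndexError in A; (b) set-typed arguments whose lists carry duplicate elements
-- (they represent no Python set); (c) inputs where some set in m_sets contains two distinct
-- elements of equal absolute value — there max(..., key=abs) breaks the tie by accidental set
-- iteration order, which differs between A's and B's differently-built sets.
def Pre_determine_consensus_placement_py (leaf_id : Int) (placements : List (Int × Int)) (unresolved_indices : List Int) (ola_vectors : List (List Int)) (m_sets : List (List (List Int))) (mismatch_neg : List Int) : Prop :=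
  placements = [] →
    ((∀ t ∈ unresolved_indices,
        (PySem.List.pyGet? ola_vectors t).isSome = true ∧
        (PySem.List.pyGet? (PySem.List.pyGetD ola_vectors t []) (leaf_id - 1)).isSome = true ∧
        (PySem.List.pyGet? m_sets t).isSome = true ∧
        (PySem.List.pyGet? (PySem.List.pyGetD m_sets t [])
          |PySem.List.pyGetD (PySem.List.pyGetD ola_vectors t []) (leaf_id - 1) 0|).isSome = true) ∧
     (∀ s ∈ m_sets, ∀ row ∈ s, row.Nodup ∧ ∀ x ∈ row, ∀ y ∈ row, |x| = |y| → x = y) ∧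
     mismatch_neg.Nodup)
instance (leaf_id : Int) (placements : List (Int × Int)) (unresolved_indices : List Int) (ola_vectors : List (List Int)) (m_sets : List (List (List Int))) (mismatch_neg : List Int) : Decidable (Pre_determine_consensus_placement_py leaf_id placements unresolved_indices ola_vectors m_sets mismatch_neg) := by unfold Pre_determine_consensus_placement_py; infer_instance

def pvWitness_determine_consensus_placement_py : Int × (List (Int × Int)) × List Int × List (List Int) × List (List (List Int)) × List Int :=
  (1, [], [0], [[0]], [[[2, -3]]], [])

def Spec_determine_consensus_placement_py (leaf_id : Int) (placements : List (Int × Int)) (unresolved_indices : List Int) (ola_vectors : List (List Int)) (m_sets : List (List (List Int))) (mismatch_neg : List Int) (out : Option Int) : Prop := out = determine_consensus_placement_py_alt leaf_id placements unresolved_indices ola_vectors m_sets mismatch_neg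
instance (leaf_id : Int) (placements : List (Int × Int)) (unresolved_indices : List Int) (ola_vectors : List (List Int)) (m_sets : List (List (List Int))) (mismatch_neg : List Int) (out : Option Int) : Decidable (Spec_determine_consensus_placement_py leaf_id placements unresolved_indices ola_vectors m_sets mismatch_neg out) := by unfold Spec_determine_consensus_placement_py; infer_instance

-- ===== CLAIM (what is proved, stated in full; the proofs are below) =====
def Claim_equal_determine_consensus_placement_py : Prop := ∀ (leaf_id : Int) (placements : List (Int × Int)) (unresolved_indices : List Int) (ola_vectors : List (List Int)) (m_sets : List (List (List Int))) (mismatch_neg : List Int), Dom_determine_consensus_placement_py leaf_id placements unresolved_indices ola_vectors m_sets mismatch_neg → Pre_determine_consensus_placement_py leaf_id placements unresolved_indices ola_vectors m_sets mismatch_neg → Spec_determine_consensus_placement_py leaf_id placements unresolved_indices ola_vectors m_sets mismatch_neg (determine_consensus_placement_py leaf_id placements unresolved_indices ola_vectors m_sets mismatch_neg)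

-- ===== LEMMAS AND PROOFS =====

theorem pv_pyGet?_mem {α : Type} (xs : List α) (i : Int) (v : α) (h : PySem.List.pyGet? xs i = some v) : v ∈ xs := by
  simp [PySem.List.pyGet?, Option.bind_eq_some_iff] at h
  obtain ⟨k, hk, hv⟩ := h
  exact List.mem_of_getElem? hv

theorem pv_pyGetD_of_get? {α : Type} (xs : List α) (i : Int) (v : α) (d : α) (h : PySem.List.pyGet? xs i = some v) : PySem.List.pyGetD xs i d = v := by
  simp [PySem.List.pyGetD, h]

theorem pv_curSet_row (leaf_id : Int) (ola : List (List Int)) (m : List (List (List Int))) (t : Int)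
    (h3 : (PySem.List.pyGet? m t).isSome = true)
    (h4 : (PySem.List.pyGet? (PySem.List.pyGetD m t [])
      |PySem.List.pyGetD (PySem.List.pyGetD ola t []) (leaf_id - 1) 0|).isSome = true) :
    ∃ s ∈ m, pvCurSet leaf_id ola m t ∈ s := by
  obtain ⟨sets, hsets⟩ := Option.isSome_iff_exists.1 h3
  obtain ⟨row, hrow⟩ := Option.isSome_iff_exists.1 h4
  refine ⟨sets, pv_pyGet?_mem _ _ _ hsets, ?_⟩
  have h1 : PySem.List.pyGetD m t [] = sets := pv_pyGetD_of_get? _ _ _ _ hsets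
  rw [h1] at hrow
  have h2 : pvCurSet leaf_id ola m t = row := by
    unfold pvCurSet
    rw [h1]
    exact pv_pyGetD_of_get? _ _ _ _ hrow
  rw [h2]
  exact pv_pyGet?_mem _ _ _ hrow

-- A's fold once started
theorem pv_foldA (S : Int → List Int) (l : List Int) (s0 : List Int) :
    l.foldl (fun acc t => match acc with
      | none => some (S t)
      | some s => some (PySem.Set.inter s (S t))) (some s0)
    = some (l.foldl (fun s t => PySem.Set.inter s (S t)) s0) := by
  induction l generalizing s0 with
  | nil => rfl
  | cons t ls ih => simpa using ih (PySem.Set.inter s0 (S t))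

theorem pv_interFold_mem (S : Int → List Int) (l : List Int) (s0 : List Int) (e : Int) :
    e ∈ l.foldl (fun s t => PySem.Set.inter s (S t)) s0 ↔ e ∈ s0 ∧ ∀ t ∈ l, e ∈ S t := by
  induction l generalizing s0 with
  | nil => simp
  | cons t ls ih =>
    simp only [List.foldl_cons, ih, PySem.Set.mem_inter, List.mem_cons]
    constructor
    · rintro ⟨⟨h0, ht⟩, hall⟩
      exact ⟨h0, fun x hx => hx.elim (fun h => h ▸ ht) (hall x)⟩
    · rintro ⟨h0, hall⟩
      exact ⟨⟨h0, hall t (Or.inl rfl)⟩, fun x hx => hall x (Or.inr hx)⟩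

-- B's counter fold
theorem pv_counts_getD (S : Int → List Int) (l : List Int) (c : PySem.Dict Int Int) (e : Int) :
    (l.foldl (fun c t => (S t).foldl (fun c e => c.modify e 0 (· + 1)) c) c).getD e 0
    = c.getD e 0 + ((l.map (fun t => (S t).count e)).sum : Int) := by
  induction l generalizing c with
  | nil => simp
  | cons t ls ih =>
    simp only [List.foldl_cons, List.map_cons, List.sum_cons, ih, PySem.Dict.getD_foldl_modify_add_one]
    push_cast; ring

theorem pv_counts_keys_nodup (S : Int → List Int) (l : List Int) (c : PySem.Dict Int Int) (h : c.keys.Nodup) :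
    (l.foldl (fun c t => (S t).foldl (fun c e => c.modify e 0 (· + 1)) c) c).keys.Nodup := by
  induction l generalizing c with
  | nil => exact h
  | cons t ls ih =>
    apply ih
    rw [PySem.Dict.keys_foldl_modify (f := fun _ _ => (· + 1))]
    exact PySem.Set.nodup_update _ _ h

theorem pv_counts_keys_mem (S : Int → List Int) (l : List Int) (c : PySem.Dict Int Int) (e : Int) :
    e ∈ (l.foldl (fun c t => (S t).foldl (fun c e => c.modify e 0 (· + 1)) c) c).keys
    ↔ e ∈ c.keys ∨ ∃ t ∈ l, e ∈ S t := by
  induction l generalizing c with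
  | nil => simp
  | cons t ls ih =>
    rw [List.foldl_cons, ih, PySem.Dict.keys_foldl_modify (f := fun _ _ => (· + 1))]
    simp only [PySem.Set.mem_update, List.mem_cons]
    constructor
    · rintro ((h | h) | ⟨x, hx, hm⟩)
      · exact Or.inl h
      · exact Or.inr ⟨t, Or.inl rfl, h⟩
      · exact Or.inr ⟨x, Or.inr hx, hm⟩
    · rintro (h | ⟨x, hx | hx, hm⟩)
      · exact Or.inl (Or.inl h)
      · exact Or.inl (Or.inr (hx ▸ hm))
      · exact Or.inr ⟨x, hx, hm⟩

-- sum of 0/1 counts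
theorem pv_sum_counts_le (S : Int → List Int) (l : List Int) (e : Int) (h : ∀ t ∈ l, (S t).Nodup) :
    (l.map (fun t => (S t).count e)).sum ≤ l.length := by
  induction l with
  | nil => simp
  | cons t ls ih =>
    simp only [List.map_cons, List.sum_cons, List.length_cons]
    have h1 : (S t).count e ≤ 1 := List.nodup_iff_count_le_one.1 (h t (by simp)) e
    have := ih (fun x hx => h x (by simp [hx]))
    omega

theorem pv_sum_counts_eq_iff (S : Int → List Int) (l : List Int) (e : Int) (h : ∀ t ∈ l, (S t).Nodup) :
    ((l.map (fun t => (S t).count e)).sum = l.length ↔ ∀ t ∈ l, e ∈ S t) := by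
  induction l with
  | nil => simp
  | cons t ls ih =>
    simp only [List.map_cons, List.sum_cons, List.length_cons, List.mem_cons]
    have h1 : (S t).count e ≤ 1 := List.nodup_iff_count_le_one.1 (h t (by simp)) e
    have h2 := pv_sum_counts_le S ls e (fun x hx => h x (by simp [hx]))
    have ihx := ih (fun x hx => h x (by simp [hx]))
    constructor
    · intro hs
      have hc1 : (S t).count e = 1 := by omega
      have hrest : (ls.map (fun t => (S t).count e)).sum = ls.length := by omega
      refine fun x hx => hx.elim (fun hh => hh ▸ ?_) (ihx.1 hrest x)
      exact List.count_pos_iff.1 (by omega)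
    · intro hall
      have hc1 : (S t).count e = 1 := by
        have := List.count_pos_iff.2 (hall t (Or.inl rfl))
        omega
      have := ihx.2 (fun x hx => hall x (Or.inr hx))
      omega
theorem pv_max?_congr (L1 L2 : List Int) (hmem : ∀ e, e ∈ L1 ↔ e ∈ L2) (hne : L1 ≠ [])
    (hinj : ∀ a ∈ L1, ∀ b ∈ L1, |a| = |b| → a = b) :
    PySem.List.max? L1 (fun x => |x|) = PySem.List.max? L2 (fun x => |x|) := by
  have hne2 : L2 ≠ [] := by
    obtain ⟨a, ha⟩ := List.exists_mem_of_ne_nil L1 hne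
    exact List.ne_nil_of_mem ((hmem a).1 ha)
  obtain ⟨m1, hm1⟩ : ∃ m, PySem.List.max? L1 (fun x => |x|) = some m := by
    cases h : PySem.List.max? L1 (fun x => |x|) with
    | none => exact absurd ((PySem.List.max?_eq_none_iff _ _).1 h) hne
    | some m => exact ⟨m, rfl⟩
  obtain ⟨m2, hm2⟩ : ∃ m, PySem.List.max? L2 (fun x => |x|) = some m := by
    cases h : PySem.List.max? L2 (fun x => |x|) with
    | none => exact absurd ((PySem.List.max?_eq_none_iff _ _).1 h) hne2
    | some m => exact ⟨m, rfl⟩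
  have h1m := PySem.List.max?_mem hm1
  have h2m : m2 ∈ L1 := (hmem m2).2 (PySem.List.max?_mem hm2)
  have hle1 : |m2| ≤ |m1| := PySem.List.max?_isMax hm1 m2 h2m
  have hle2 : |m1| ≤ |m2| := PySem.List.max?_isMax hm2 m1 ((hmem m1).1 h1m)
  have : m1 = m2 := hinj m1 h1m m2 h2m (le_antisymm hle2 hle1)
  rw [hm1, hm2, this]

theorem pv_main (leaf_id : Int) (ola : List (List Int)) (m : List (List (List Int))) (mm : List Int) (l : List Int)
    (hS : ∀ t ∈ l, ∃ s ∈ m, pvCurSet leaf_id ola m t ∈ s)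
    (hRows : ∀ s ∈ m, ∀ row ∈ s, row.Nodup ∧ ∀ x ∈ row, ∀ y ∈ row, |x| = |y| → x = y) :
    (match (match l.foldl (fun acc t =>
        match acc with
        | none => some (pvCurSet leaf_id ola m t)
        | some s => some (PySem.Set.inter s (pvCurSet leaf_id ola m t))) none with
      | none => none
      | some s => if s ≠ [] then some (PySem.Set.diff s mm) else some s) with
    | none => none
    | some s => if s = [] then none else PySem.List.max? s (fun x => |x|))
    =
    (if (PySem.Set.diff (PySem.Set.ofList (((l.foldl (fun c t =>
          (pvCurSet leaf_id ola m t).foldl (fun c e => c.modify e 0 (· + 1)) c)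
          (PySem.Dict.empty : PySem.Dict Int Int)).items.filter (fun p => p.2 == (l.length : Int))).map (·.1))) mm : List Int) = []
     then none
     else PySem.List.max? (PySem.Set.diff (PySem.Set.ofList (((l.foldl (fun c t =>
          (pvCurSet leaf_id ola m t).foldl (fun c e => c.modify e 0 (· + 1)) c)
          (PySem.Dict.empty : PySem.Dict Int Int)).items.filter (fun p => p.2 == (l.length : Int))).map (·.1))) mm) (fun x => |x|)) := by
  have hNodup : ∀ t ∈ l, (pvCurSet leaf_id ola m t).Nodup := by
    intro t ht
    obtain ⟨s, hs, hr⟩ := hS t ht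
    exact (hRows s hs _ hr).1
  have hTie : ∀ t ∈ l, ∀ x ∈ pvCurSet leaf_id ola m t, ∀ y ∈ pvCurSet leaf_id ola m t, |x| = |y| → x = y := by
    intro t ht
    obtain ⟨s, hs, hr⟩ := hS t ht
    exact (hRows s hs _ hr).2
  cases l with
  | nil => rfl
  | cons t0 ls =>
    have hA : List.foldl (fun acc t =>
        match acc with
        | none => some (pvCurSet leaf_id ola m t)
        | some s => some (PySem.Set.inter s (pvCurSet leaf_id ola m t))) none (t0 :: ls)
        = some (ls.foldl (fun s t => PySem.Set.inter s (pvCurSet leaf_id ola m t)) (pvCurSet leaf_id ola m t0)) := by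
      rw [List.foldl_cons]
      exact pv_foldA _ _ _
    rw [hA]
    set S := pvCurSet leaf_id ola m with hSdef
    set sA := List.foldl (fun s t => PySem.Set.inter s (S t)) (S t0) ls with hsAdef
    set counts := List.foldl
        (fun c t => List.foldl (fun c e => c.modify e 0 fun x => x + 1) c (S t))
        (PySem.Dict.empty : PySem.Dict Int Int) (t0 :: ls) with hcdef
    set cand : List Int := (PySem.Set.ofList
        (List.map (fun x => x.1)
          (List.filter (fun p => p.2 == ((t0 :: ls).length : Int)) counts.items))).diff mm with hcanddef
    have hmemA : ∀ e, e ∈ sA ↔ ∀ t ∈ t0 :: ls, e ∈ S t := by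
      intro e
      rw [hsAdef, pv_interFold_mem, List.forall_mem_cons]
    have hkeysN : counts.keys.Nodup := by
      rw [hcdef]
      exact pv_counts_keys_nodup S _ _ (by rw [PySem.Dict.keys_empty]; exact List.nodup_nil)
    have hgetD : ∀ e, counts.getD e 0 = (((t0 :: ls).map (fun t => (S t).count e)).sum : Int) := by
      intro e
      rw [hcdef, pv_counts_getD, PySem.Dict.getD_empty, zero_add]
    have hkeysMem : ∀ e, e ∈ counts.keys ↔ ∃ t ∈ t0 :: ls, e ∈ S t := by
      intro e
      rw [hcdef, pv_counts_keys_mem, PySem.Dict.keys_empty]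
      simp
    have hmemB : ∀ e, e ∈ cand ↔ (∀ t ∈ t0 :: ls, e ∈ S t) ∧ e ∉ mm := by
      intro e
      rw [hcanddef, PySem.Set.mem_diff, PySem.Set.mem_ofList]
      constructor
      · rintro ⟨hme, hmm2⟩
        refine ⟨?_, hmm2⟩
        simp only [List.mem_map, List.mem_filter, beq_iff_eq] at hme
        obtain ⟨p, ⟨hpi, hpn⟩, hpe⟩ := hme
        have hval : counts.getD p.1 0 = p.2 :=
          PySem.Dict.getD_of_mem_items counts (by rwa [← Prod.eta p] at hpi) hkeysN 0
        rw [hgetD] at hval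
        rw [← hpe]
        have hsum : ((t0 :: ls).map (fun t => (S t).count p.1)).sum = (t0 :: ls).length := by
          have := hval.trans hpn
          exact_mod_cast this
        exact (pv_sum_counts_eq_iff S (t0 :: ls) p.1 hNodup).1 hsum
      · rintro ⟨hall, hmm2⟩
        refine ⟨?_, hmm2⟩
        simp only [List.mem_map, List.mem_filter, beq_iff_eq]
        refine ⟨(e, counts.getD e 0), ⟨?_, ?_⟩, rfl⟩
        · rw [PySem.Dict.items_eq_map_keys counts hkeysN 0]
          exact List.mem_map_of_mem ((hkeysMem e).2 ⟨t0, by simp, hall t0 (by simp)⟩)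
        · show counts.getD e 0 = ((t0 :: ls).length : Int)
          rw [hgetD]
          exact_mod_cast (pv_sum_counts_eq_iff S (t0 :: ls) e hNodup).2 hall
    by_cases hsA : sA = []
    · have hcand : cand = [] := by
        rw [List.eq_nil_iff_forall_not_mem]
        intro e he
        have heA : e ∈ sA := (hmemA e).2 ((hmemB e).1 he).1
        rw [hsA] at heA
        simp at heA
      rw [hcand, if_pos rfl]
      show (match (if sA ≠ [] then some (PySem.Set.diff sA mm) else some sA) with
        | none => none
        | some s => if s = [] then none else PySem.List.max? s (fun x => |x|)) = none
      rw [if_neg (by simpa using hsA)]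
      show (if sA = [] then none else PySem.List.max? sA (fun x => |x|)) = none
      rw [if_pos hsA]
    · show (match (if sA ≠ [] then some (PySem.Set.diff sA mm) else some sA) with
        | none => none
        | some s => if s = [] then none else PySem.List.max? s (fun x => |x|)) = _
      rw [if_pos hsA]
      show (if PySem.Set.diff sA mm = [] then none
        else PySem.List.max? (PySem.Set.diff sA mm) (fun x => |x|)) = _
      have hmemD : ∀ e, e ∈ PySem.Set.diff sA mm ↔ e ∈ cand := by
        intro e
        rw [PySem.Set.mem_diff, hmemA e, hmemB e]
      by_cases hd : PySem.Set.diff sA mm = []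
      · have hcand : cand = [] := by
          rw [List.eq_nil_iff_forall_not_mem]
          intro e he
          have := (hmemD e).2 he
          rw [hd] at this
          simp at this
        rw [if_pos hd, if_pos hcand]
      · have hcne : cand ≠ [] := by
          intro hc
          apply hd
          rw [List.eq_nil_iff_forall_not_mem]
          intro e he
          have := (hmemD e).1 he
          rw [hc] at this
          simp at this
        rw [if_neg hd, if_neg hcne]
        apply pv_max?_congr _ _ hmemD hd
        intro a ha b hb habs
        have haA : a ∈ S t0 := ((hmemA a).1 ((PySem.Set.mem_diff sA mm a).1 ha).1) t0 (by simp)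
        have hbA : b ∈ S t0 := ((hmemA b).1 ((PySem.Set.mem_diff sA mm b).1 hb).1) t0 (by simp)
        exact hTie t0 (by simp) a haA b hbA habs

theorem pv_insert_items_ne_nil {κ ν : Type} [BEq κ] [LawfulBEq κ] (d : PySem.Dict κ ν) (k : κ) (v : ν) :
    (d.insert k v).items ≠ [] := by
  rw [PySem.Dict.items_insert]
  split_ifs with h
  · have hk : k ∈ d.keys := (PySem.Dict.contains_iff_mem_keys d k).1 h
    have : d.items ≠ [] := by
      intro hn
      rw [PySem.Dict.keys, hn] at hk
      simp at hk
    simpa using this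
  · simp

theorem pv_foldl_insert_items_ne_nil {κ ν : Type} [BEq κ] [LawfulBEq κ] (ps : List (κ × ν)) (d : PySem.Dict κ ν)
    (h : d.items ≠ []) : (ps.foldl (fun acc p => acc.insert p.1 p.2) d).items ≠ [] := by
  induction ps generalizing d with
  | nil => exact h
  | cons p ps ih => exact ih _ (pv_insert_items_ne_nil d p.1 p.2)

theorem pv_ofList_items_nil {κ ν : Type} [BEq κ] [LawfulBEq κ] (ps : List (κ × ν))
    (h : (PySem.Dict.ofList ps).items = []) : ps = [] := by
  cases ps with
  | nil => rfl
  | cons p ps =>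
    exact absurd h (by
      show ((p :: ps).foldl (fun acc p => acc.insert p.1 p.2) PySem.Dict.empty).items ≠ []
      rw [List.foldl_cons]
      exact pv_foldl_insert_items_ne_nil ps _ (pv_insert_items_ne_nil _ p.1 p.2))

theorem pv_branches (leaf_id : Int) (placements : List (Int × Int)) (l : List Int) (ola : List (List Int)) (m : List (List (List Int))) (mm : List Int)
    (hPre : Pre_determine_consensus_placement_py leaf_id placements l ola m mm) :
    determine_consensus_placement_py leaf_id placements l ola m mm
    = determine_consensus_placement_py_alt leaf_id placements l ola m mm := by
  unfold determine_consensus_placement_py determine_consensus_placement_py_alt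
  by_cases hg : PySem.Set.len (PySem.Set.ofList (PySem.Dict.ofList placements).values) > 1
  · rw [if_pos hg, if_pos hg]
  · rw [if_neg hg, if_neg hg]
    by_cases hne : (PySem.Dict.ofList placements).items = []
    · rw [if_neg (by simpa using hne), if_neg (by simpa using hne)]
      have hpl := pv_ofList_items_nil _ hne
      obtain ⟨hIdx, hRows, hmmN⟩ := hPre hpl
      have hS : ∀ t ∈ l, ∃ s ∈ m, pvCurSet leaf_id ola m t ∈ s := by
        intro t ht
        obtain ⟨_, _, h3, h4⟩ := hIdx t ht
        exact pv_curSet_row leaf_id ola m t h3 h4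
      exact pv_main leaf_id ola m mm l hS hRows
    · rw [if_pos (by simpa using hne), if_pos (by simpa using hne)]

-- ===== VERDICT (by name: the statement is the Claim_ definition above) =====
theorem determine_consensus_placement_py_spec : Claim_equal_determine_consensus_placement_py := by
  intro leaf_id placements unresolved_indices ola_vectors m_sets mismatch_neg _ hPre
  exact pv_branches leaf_id placements unresolved_indices ola_vectors m_sets mismatch_neg hPre
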